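-- pv_equiv track=rewrite | github.com/rcastano/cpachecker-1 | scripts/benchmark/tools/coverage_underapprox_with_traversal.py | get_value_from_output
-- ===== SOURCE A (Python) =====
-- def get_value_from_output(lines, identifier):
--     # search for the text in output and get its value,
--     # stop after the first line, that contains the searched text
--     result = None
--     for line in lines:
--         if identifier in line:
--             startPosition = line.find(':') + 1
--             endPosition = line.find('(', startPosition) # bracket maybe not found -> (-1)
--             if (endPosition == -1):
--                 result = line[startPosition:].strip()
--             else:
--                 result = line[startPosition: endPosition].strip()
--     return result
-- ===== SOURCE B (Python) =====
-- def get_value_from_output(lines, identifier):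
--     # Scan from the end: the first reverse match is the last forward match.
--     for line in reversed(list(lines)):
--         if identifier in line:
--             return _extract_value(line)
--     return None
--
-- def _extract_value(line):
--     start = line.find(':') + 1
--     end = line.find('(', start)
--     return (line[start:] if end == -1 else line[start:end]).strip()
-- ===== Notes on version B (the rewrite author's own statement) =====
-- stated objective: alternative
-- what changed: B materializes the lines and scans them in reverse, returning on the first match (= A's last match), with the value extraction factored into a helper, instead of A's full forward scan that overwrites an accumulator.
import Mathlib
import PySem

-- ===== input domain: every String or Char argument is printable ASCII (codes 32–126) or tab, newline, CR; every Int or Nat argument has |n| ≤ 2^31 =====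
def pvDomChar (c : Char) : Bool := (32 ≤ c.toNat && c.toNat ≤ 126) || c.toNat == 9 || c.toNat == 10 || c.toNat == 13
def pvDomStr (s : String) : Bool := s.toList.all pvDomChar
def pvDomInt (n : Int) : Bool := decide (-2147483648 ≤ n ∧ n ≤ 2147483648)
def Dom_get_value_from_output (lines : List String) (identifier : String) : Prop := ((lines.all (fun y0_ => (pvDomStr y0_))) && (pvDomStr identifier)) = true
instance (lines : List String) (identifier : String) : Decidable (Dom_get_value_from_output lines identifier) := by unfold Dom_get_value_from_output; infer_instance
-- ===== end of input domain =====

-- B scans the materialized lines in reverse and returns on the first match (A's last match),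
-- with value extraction factored into a helper; objective: alternative decomposition, same result.


-- ===== PORT A =====
-- literal transliteration of A: a forward fold over the lines, overwriting `result`
-- on every line containing `identifier`, parsing inline.
def get_value_from_output (lines : List String) (identifier : String) : Option String :=
  lines.foldl
    (fun result line =>
      if PySem.Str.isIn identifier line then
        let startPosition : Int := PySem.Str.find line ":" + 1
        let endPosition : Int := PySem.Str.findFrom line "(" startPosition
        if endPosition = -1 then
          some (PySem.Str.strip (PySem.Str.slice line (some startPosition) none))
        else
          some (PySem.Str.strip (PySem.Str.slice line (some startPosition) (some endPosition)))
      else result)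
    none

-- ===== PORT B =====
-- B-side helper: _extract_value(line)
def gvExtractValue (line : String) : String :=
  let start : Int := PySem.Str.find line ":" + 1
  let stop : Int := PySem.Str.findFrom line "(" start
  PySem.Str.strip
    (if stop = -1 then PySem.Str.slice line (some start) none
     else PySem.Str.slice line (some start) (some stop))

-- B-side helper: the early-return loop over the (already reversed) lines
def gvFirstMatch : List String → String → Option String
  | [], _ => none
  | line :: rest, identifier =>
      if PySem.Str.isIn identifier line then some (gvExtractValue line)
      else gvFirstMatch rest identifier

def get_value_from_output_alt (lines : List String) (identifier : String) : Option String :=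
  gvFirstMatch lines.reverse identifier

-- ===== PRECONDITION & SPEC =====
def Spec_get_value_from_output (lines : List String) (identifier : String) (out : Option String) : Prop := out = get_value_from_output_alt lines identifier
instance (lines : List String) (identifier : String) (out : Option String) : Decidable (Spec_get_value_from_output lines identifier out) := by unfold Spec_get_value_from_output; infer_instance

-- ===== CLAIM (what is proved, stated in full; the proofs are below) =====
def Claim_equal_get_value_from_output : Prop := ∀ (lines : List String) (identifier : String), Dom_get_value_from_output lines identifier → Spec_get_value_from_output lines identifier (get_value_from_output lines identifier)

-- ===== LEMMAS AND PROOFS =====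

-- first match distributes over append: scan the front, fall through to the back
theorem gvFirstMatch_append (xs ys : List String) (identifier : String) :
    gvFirstMatch (xs ++ ys) identifier
      = (gvFirstMatch xs identifier).or (gvFirstMatch ys identifier) := by
  induction xs with
  | nil => simp [gvFirstMatch]
  | cons l ls ih =>
      simp only [List.cons_append, gvFirstMatch]
      split <;> simp [ih]

-- one step of A's fold equals a one-line reverse scan falling back to the accumulator
theorem gvStep (l identifier : String) (acc : Option String) :
    (if PySem.Str.isIn identifier l then
       let startPosition : Int := PySem.Str.find l ":" + 1
       let endPosition : Int := PySem.Str.findFrom l "(" startPosition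
       if endPosition = -1 then
         some (PySem.Str.strip (PySem.Str.slice l (some startPosition) none))
       else
         some (PySem.Str.strip (PySem.Str.slice l (some startPosition) (some endPosition)))
     else acc)
    = (gvFirstMatch [l] identifier).or acc := by
  simp only [gvFirstMatch, gvExtractValue]
  split_ifs <;> simp [Option.or]

-- A's fold with accumulator acc equals B's reverse scan, falling back to acc
theorem gvFold_eq (lines : List String) (identifier : String) (acc : Option String) :
    lines.foldl
      (fun result line =>
        if PySem.Str.isIn identifier line then
          let startPosition : Int := PySem.Str.find line ":" + 1
          let endPosition : Int := PySem.Str.findFrom line "(" startPosition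
          if endPosition = -1 then
            some (PySem.Str.strip (PySem.Str.slice line (some startPosition) none))
          else
            some (PySem.Str.strip (PySem.Str.slice line (some startPosition) (some endPosition)))
        else result)
      acc
    = (gvFirstMatch lines.reverse identifier).or acc := by
  induction lines generalizing acc with
  | nil => simp [gvFirstMatch]
  | cons l ls ih =>
      rw [List.foldl_cons, ih, List.reverse_cons, gvFirstMatch_append]
      simp only [gvStep]
      cases gvFirstMatch ls.reverse identifier <;> cases gvFirstMatch [l] identifier <;>
        simp [Option.or]

-- ===== VERDICT (by name: the statement is the Claim_ definition above) =====
theorem get_value_from_output_spec : Claim_equal_get_value_from_output := by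
  intro lines identifier _
  unfold Spec_get_value_from_output get_value_from_output get_value_from_output_alt
  rw [gvFold_eq]
  cases gvFirstMatch lines.reverse identifier <;> simp [Option.or]
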